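-- pv_equiv track=rewrite | github.com/tamnguyen234/DBMS_SM_1 | streamlit_app.py | stop_at_first_match
-- ===== SOURCE A (Python) =====
-- def stop_at_first_match(visited_blocks: list[int], matched_blocks: set[int]) -> set[int]:
--     if not visited_blocks:
--         return set()
--     if not matched_blocks:
--         return set(visited_blocks)
--     cut_index = None
--     for index, block_id in enumerate(visited_blocks):
--         if block_id in matched_blocks:
--             cut_index = index
--             break
--     if cut_index is None:
--         return set(visited_blocks)
--     return set(visited_blocks[: cut_index + 1])
-- ===== SOURCE B (Python) =====
-- def stop_at_first_match(visited_blocks: list[int], matched_blocks: set[int]) -> set[int]: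
--     result = set()
--     for block_id in visited_blocks:
--         result.add(block_id)
--         if block_id in matched_blocks:
--             break
--     return result
-- ===== Notes on version B (the rewrite author's own statement) =====
-- stated objective: simpler
-- what changed: Replaces A's two guard clauses, enumerate-based index search, slice and final set() conversions with one accumulate-and-break loop that builds the set directly.
import Mathlib
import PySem

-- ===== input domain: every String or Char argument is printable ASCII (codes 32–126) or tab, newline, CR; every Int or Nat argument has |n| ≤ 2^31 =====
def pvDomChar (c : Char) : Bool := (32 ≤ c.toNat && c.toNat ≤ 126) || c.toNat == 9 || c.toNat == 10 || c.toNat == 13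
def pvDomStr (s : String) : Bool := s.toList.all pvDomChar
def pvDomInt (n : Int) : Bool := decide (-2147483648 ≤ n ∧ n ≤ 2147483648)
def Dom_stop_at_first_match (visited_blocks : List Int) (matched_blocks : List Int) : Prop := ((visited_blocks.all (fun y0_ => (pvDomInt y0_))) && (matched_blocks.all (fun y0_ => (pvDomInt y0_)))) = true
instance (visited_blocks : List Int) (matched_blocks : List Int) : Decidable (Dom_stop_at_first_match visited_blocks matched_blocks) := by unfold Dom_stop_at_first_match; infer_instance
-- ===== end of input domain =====

-- B replaces A's guard clauses, index-finding loop, slice and set() conversions by one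
-- accumulate-and-break loop that builds the set directly (objective: simpler).

-- ===== PORT A =====
-- the 'for index, block_id in enumerate(...): if block_id in matched: cut_index = index; break' loop
def pvFindCut (visited_blocks : List Int) (matched_blocks : List Int) : Option Nat :=
  match visited_blocks with
  | [] => none
  | b :: rest =>
    if b ∈ matched_blocks then some 0
    else (pvFindCut rest matched_blocks).map (· + 1)

def stop_at_first_match (visited_blocks : List Int) (matched_blocks : List Int) : List Int :=
  if visited_blocks = [] then PySem.Set.empty
  else if matched_blocks = [] then PySem.Set.ofList visited_blocks
  else
    match pvFindCut visited_blocks matched_blocks with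
    | none => PySem.Set.ofList visited_blocks
    | some cut_index => PySem.Set.ofList (visited_blocks.take (cut_index + 1))

-- ===== PORT B =====
def pvAltLoop (visited_blocks : List Int) (matched_blocks : List Int) (result : PySem.Set Int) : PySem.Set Int :=
  match visited_blocks with
  | [] => result
  | b :: rest =>
    let result' := PySem.Set.add result b
    if b ∈ matched_blocks then result'
    else pvAltLoop rest matched_blocks result'

def stop_at_first_match_alt (visited_blocks : List Int) (matched_blocks : List Int) : List Int :=
  pvAltLoop visited_blocks matched_blocks PySem.Set.empty

-- ===== PRECONDITION & SPEC =====
def Spec_stop_at_first_match (visited_blocks : List Int) (matched_blocks : List Int) (out : List Int) : Prop := out = stop_at_first_match_alt visited_blocks matched_blocks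
instance (visited_blocks : List Int) (matched_blocks : List Int) (out : List Int) : Decidable (Spec_stop_at_first_match visited_blocks matched_blocks out) := by unfold Spec_stop_at_first_match; infer_instance

-- ===== CLAIM (what is proved, stated in full; the proofs are below) =====
def Claim_equal_stop_at_first_match : Prop := ∀ (visited_blocks : List Int) (matched_blocks : List Int), Dom_stop_at_first_match visited_blocks matched_blocks → Spec_stop_at_first_match visited_blocks matched_blocks (stop_at_first_match visited_blocks matched_blocks)

-- ===== LEMMAS AND PROOFS =====

-- the prefix of `vis` up to and including the first element in `m` (whole list if none)
def pvTakeUntil (vis m : List Int) : List Int :=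
  match vis with
  | [] => []
  | b :: rest => if b ∈ m then [b] else b :: pvTakeUntil rest m

theorem pvAltLoop_eq_update (vis m : List Int) (acc : PySem.Set Int) :
    pvAltLoop vis m acc = PySem.Set.update acc (pvTakeUntil vis m) := by
  induction vis generalizing acc with
  | nil => simp [pvAltLoop, pvTakeUntil, PySem.Set.update]
  | cons b rest ih =>
    by_cases h : b ∈ m <;>
      simp [pvAltLoop, pvTakeUntil, h, ih, PySem.Set.update]

theorem pvTakeUntil_of_none (vis m : List Int) (h : pvFindCut vis m = none) :
    pvTakeUntil vis m = vis := by
  induction vis with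
  | nil => rfl
  | cons b rest ih =>
    by_cases hb : b ∈ m
    · simp [pvFindCut, hb] at h
    · simp [pvFindCut, hb, Option.map_eq_none_iff] at h
      simp [pvTakeUntil, hb, ih h]

theorem pvTakeUntil_of_some (vis m : List Int) (i : Nat) (h : pvFindCut vis m = some i) :
    pvTakeUntil vis m = vis.take (i + 1) := by
  induction vis generalizing i with
  | nil => simp [pvFindCut] at h
  | cons b rest ih =>
    by_cases hb : b ∈ m
    · simp [pvFindCut, hb] at h
      simp [pvTakeUntil, hb, ← h]
    · simp [pvFindCut, hb] at h
      obtain ⟨j, hj, rfl⟩ := h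
      simp [pvTakeUntil, hb, ih j hj]

theorem pvFindCut_empty (vis : List Int) : pvFindCut vis ([] : List Int) = none := by
  induction vis with
  | nil => rfl
  | cons b rest ih => simp [pvFindCut, ih]

-- ===== VERDICT (by name: the statement is the Claim_ definition above) =====
theorem stop_at_first_match_spec : Claim_equal_stop_at_first_match := by
  intro vis m _
  show stop_at_first_match vis m = stop_at_first_match_alt vis m
  unfold stop_at_first_match stop_at_first_match_alt
  rw [pvAltLoop_eq_update]
  have hupd : ∀ xs : List Int, PySem.Set.update PySem.Set.empty xs = PySem.Set.ofList xs := by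
    intro xs; rfl
  rw [hupd]
  by_cases hv : vis = []
  · subst hv; rfl
  · simp only [hv, if_false]
    by_cases hm : m = []
    · subst hm
      simp [pvTakeUntil_of_none vis [] (pvFindCut_empty vis)]
    · simp only [hm, if_false]
      cases hc : pvFindCut vis m with
      | none => rw [pvTakeUntil_of_none vis m hc]
      | some i => rw [pvTakeUntil_of_some vis m i hc]
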